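-- pv_equiv track=rewrite | github.com/Alirezabln/AventOfCode2023 | Day11/day11_part1.py | get_cols_without_stars
-- ===== SOURCE A (Python) =====
-- def get_cols_without_stars(rows):
--     cols_without_stars = []
--     for i in range(len(rows[0])):
--         col_without_stars = True
--         for j in range(len(rows)):
--             if rows[j][i] == '#':
--                 col_without_stars = False
--                 break
--         if col_without_stars == True:
--             cols_without_stars.append(i)
--     return cols_without_stars
-- ===== SOURCE B (Python) =====
-- def get_cols_without_stars(rows):
--     star_cols = set()
--     for row in rows:
--         for i, ch in enumerate(row):
--             if ch == '#':
--                 star_cols.add(i)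
--     return [i for i in range(len(rows[0])) if i not in star_cols]
-- ===== Notes on version B (the rewrite author's own statement) =====
-- stated objective: idiomatic
-- what changed: Replaces the column-by-column scan with an early break by a single row-major character pass that records every column containing '#' in a set, then lists the remaining column indices.
import Mathlib
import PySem

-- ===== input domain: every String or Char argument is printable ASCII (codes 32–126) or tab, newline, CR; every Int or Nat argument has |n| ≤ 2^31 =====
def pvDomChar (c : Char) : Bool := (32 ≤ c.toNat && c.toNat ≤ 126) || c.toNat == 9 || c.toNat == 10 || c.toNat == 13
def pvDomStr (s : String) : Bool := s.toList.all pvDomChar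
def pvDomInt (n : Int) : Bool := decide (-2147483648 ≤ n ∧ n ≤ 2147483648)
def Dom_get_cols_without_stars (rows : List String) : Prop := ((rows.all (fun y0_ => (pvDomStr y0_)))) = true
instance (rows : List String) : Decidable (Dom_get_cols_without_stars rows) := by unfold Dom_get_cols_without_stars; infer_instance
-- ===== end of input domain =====

-- B replaces A's column-by-column scan (inner loop with break) by one row-major
-- character pass collecting the set of starred columns, then filters the column range
-- (objective: idiomatic; same return value on Pre_).

-- ===== PORT A =====
-- inner 'for j in range(len(rows))' loop with its break, as structural recursion over the j-range
def get_cols_without_stars_colClear (rows : List String) (i : Int) : List Int → Bool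
  | [] => true
  | j :: js =>
    if PySem.Str.pyGet? ((PySem.List.pyGet? rows j).getD "") i = some '#' then false
    else get_cols_without_stars_colClear rows i js

def get_cols_without_stars (rows : List String) : List Int :=
  (PySem.List.pyRange 0 (PySem.Str.len ((PySem.List.pyGet? rows 0).getD "")) 1).foldl
    (fun acc i =>
      if get_cols_without_stars_colClear rows i (PySem.List.pyRange 0 (rows.length : Int) 1)
      then acc ++ [i] else acc) []

-- ===== PORT B =====
def get_cols_without_stars_alt (rows : List String) : List Int :=
  let star_cols : PySem.Set Int :=
    rows.foldl (fun s row =>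
      (PySem.List.enumerate row.toList 0).foldl
        (fun s p => if p.2 = '#' then PySem.Set.add s p.1 else s) s) PySem.Set.empty
  (PySem.List.pyRange 0 (PySem.Str.len ((PySem.List.pyGet? rows 0).getD "")) 1).filter
    (fun i => !(PySem.Set.contains star_cols i))

-- ===== PRECONDITION & SPEC =====
-- Pre_ excludes exactly the inputs on which Python A raises IndexError: the empty grid
-- (rows[0]), and grids where some column scan reaches a row shorter than the first row
-- before hitting a '#' (rows[j][i]); a short row preceded in that column by a '#' row is fine.
def Pre_get_cols_without_stars (rows : List String) : Prop :=
  rows ≠ [] ∧ ∀ i < (rows.headD "").toList.length, ∀ j < rows.length,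
    (rows.getD j "").toList.length ≤ i →
      ∃ j' < j, i < (rows.getD j' "").toList.length ∧ (rows.getD j' "").toList.getD i ' ' = '#'
instance (rows : List String) : Decidable (Pre_get_cols_without_stars rows) := by
  unfold Pre_get_cols_without_stars; infer_instance

def pvWitness_get_cols_without_stars : List String := [".#.", "...", "#.."]

def Spec_get_cols_without_stars (rows : List String) (out : List Int) : Prop := out = get_cols_without_stars_alt rows
instance (rows : List String) (out : List Int) : Decidable (Spec_get_cols_without_stars rows out) := by unfold Spec_get_cols_without_stars; infer_instance

-- ===== CLAIM (what is proved, stated in full; the proofs are below) =====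
def Claim_equal_get_cols_without_stars : Prop := ∀ (rows : List String), Dom_get_cols_without_stars rows → Pre_get_cols_without_stars rows → Spec_get_cols_without_stars rows (get_cols_without_stars rows)

-- ===== LEMMAS AND PROOFS =====

-- A's inner loop returns true iff no row (scanned by index) has '#' in column i
theorem colClear_eq_true_iff (rows : List String) (i : Int) (js : List Int) :
    get_cols_without_stars_colClear rows i js = true ↔
      ∀ j ∈ js, PySem.Str.pyGet? ((PySem.List.pyGet? rows j).getD "") i ≠ some '#' := by
  induction js with
  | nil => simp [get_cols_without_stars_colClear]
  | cons j js ih =>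
    simp only [get_cols_without_stars_colClear, List.mem_cons]
    split_ifs with h
    · constructor
      · intro hf; simp at hf
      · intro hall; exact absurd h (hall j (Or.inl rfl))
    · simp only [ih]
      constructor
      · rintro hall k (rfl | hk)
        · exact h
        · exact hall k hk
      · intro hall k hk; exact hall k (Or.inr hk)

-- membership in the inner (per-row) fold of B
theorem mem_inner_fold (cs : List Char) (st : Int) (s : PySem.Set Int) (i : Int) :
    (i ∈ (PySem.List.enumerate cs st).foldl
        (fun s p => if p.2 = '#' then PySem.Set.add s p.1 else s) s) ↔
      i ∈ s ∨ ∃ p ∈ PySem.List.enumerate cs st, p.2 = '#' ∧ i = p.1 := by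
  induction cs generalizing st s with
  | nil => simp [PySem.List.enumerate_nil]
  | cons c cs ih =>
    rw [PySem.List.enumerate_cons]
    simp only [List.foldl_cons, List.mem_cons]
    rw [ih]
    by_cases hc : c = '#'
    case pos => simp [hc, PySem.Set.mem_add]; tauto
    case neg => simp [hc]

-- membership in B's star_cols set
theorem mem_star_fold (rows : List String) (s : PySem.Set Int) (i : Int) :
    (i ∈ rows.foldl (fun s row =>
        (PySem.List.enumerate row.toList 0).foldl
          (fun s p => if p.2 = '#' then PySem.Set.add s p.1 else s) s) s) ↔
      i ∈ s ∨ ∃ row ∈ rows, ∃ p ∈ PySem.List.enumerate row.toList 0, p.2 = '#' ∧ i = p.1 := by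
  induction rows generalizing s with
  | nil => simp
  | cons r rows ih =>
    simp only [List.foldl_cons, List.mem_cons]
    rw [ih, mem_inner_fold]
    constructor
    · rintro ((h | ⟨p, hp, h1, h2⟩) | ⟨row, hrow, hp⟩)
      · exact Or.inl h
      · exact Or.inr ⟨r, Or.inl rfl, p, hp, h1, h2⟩
      · exact Or.inr ⟨row, Or.inr hrow, hp⟩
    · rintro (h | ⟨row, (rfl | hrow), hp⟩)
      · exact Or.inl (Or.inl h)
      · exact Or.inl (Or.inr hp)
      · exact Or.inr ⟨row, hrow, hp⟩

-- the'#'-at-column-i conditions of the two ports agree for 0 ≤ i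
theorem star_cond_iff (rows : List String) (i : Int) (hi : 0 ≤ i) :
    (∃ row ∈ rows, ∃ p ∈ PySem.List.enumerate row.toList 0, p.2 = '#' ∧ i = p.1) ↔
      ∃ j ∈ PySem.List.pyRange 0 (rows.length : Int) 1,
        PySem.Str.pyGet? ((PySem.List.pyGet? rows j).getD "") i = some '#' := by
  constructor
  · rintro ⟨row, hrow, p, hp, hhash, rfl⟩
    obtain ⟨k, hk, rfl⟩ := (PySem.List.mem_enumerate_iff _ _ _).mp hp
    obtain ⟨j, hj, rfl⟩ := List.mem_iff_getElem.mp hrow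
    refine ⟨(j : Int), ?_, ?_⟩
    · rw [PySem.List.mem_pyRange_one]; constructor <;> [positivity; exact_mod_cast hj]
    · rw [PySem.List.pyGet?_natCast, List.getElem?_eq_getElem hj]
      simp only [Option.getD_some, PySem.Str.pyGet?, PySem.Chars.pyGet?_eq_listPyGet?]
      rw [show ((0 : Int) + (k : Int)) = (k : Int) by ring, PySem.List.pyGet?_natCast,
        List.getElem?_eq_getElem hk]
      exact congrArg some hhash
  · rintro ⟨j, hj, hhash⟩
    rw [PySem.List.mem_pyRange_one] at hj
    have hjn : j.toNat < rows.length := by omega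
    have h0 : PySem.List.pyGet? rows j = some rows[j.toNat] :=
      PySem.List.pyGet?_eq_some_getElem rows hj.1 (by exact_mod_cast hj.2)
    rw [h0] at hhash
    simp only [Option.getD_some, PySem.Str.pyGet?, PySem.Chars.pyGet?_eq_listPyGet?] at hhash
    rw [PySem.List.pyGet?_of_nonneg _ hi] at hhash
    rw [List.getElem?_eq_some_iff] at hhash
    obtain ⟨hlt, hEq⟩ := hhash
    refine ⟨rows[j.toNat], List.getElem_mem hjn, (i, '#'), ?_, rfl, rfl⟩
    rw [PySem.List.mem_enumerate_iff]
    exact ⟨i.toNat, hlt, by simp [hEq]; omega⟩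

-- ===== VERDICT (by name: the statement is the Claim_ definition above) =====
theorem get_cols_without_stars_spec : Claim_equal_get_cols_without_stars := by
  intro rows _ _
  unfold Spec_get_cols_without_stars get_cols_without_stars get_cols_without_stars_alt
  rw [PySem.List.foldl_append_if_eq_filter, List.nil_append]
  apply List.filter_congr
  intro i hi
  rw [PySem.List.mem_pyRange_one] at hi
  have hmem : (i ∈ rows.foldl (fun s row =>
      (PySem.List.enumerate row.toList 0).foldl
        (fun s p => if p.2 = '#' then PySem.Set.add s p.1 else s) s) PySem.Set.empty) ↔
      ∃ row ∈ rows, ∃ p ∈ PySem.List.enumerate row.toList 0, p.2 = '#' ∧ i = p.1 := by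
    rw [mem_star_fold]
    simp [PySem.Set.empty]
  by_cases hstar :
      ∃ j ∈ PySem.List.pyRange 0 (rows.length : Int) 1,
        PySem.Str.pyGet? ((PySem.List.pyGet? rows j).getD "") i = some '#'
  · have hA : get_cols_without_stars_colClear rows i
        (PySem.List.pyRange 0 (rows.length : Int) 1) = false := by
      cases h : get_cols_without_stars_colClear rows i
          (PySem.List.pyRange 0 (rows.length : Int) 1) with
      | false => rfl
      | true =>
        obtain ⟨j, hj, hh⟩ := hstar
        exact absurd hh ((colClear_eq_true_iff rows i _).mp h j hj)
    have hB : PySem.Set.contains (rows.foldl (fun s row =>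
        (PySem.List.enumerate row.toList 0).foldl
          (fun s p => if p.2 = '#' then PySem.Set.add s p.1 else s) s) PySem.Set.empty) i = true := by
      rw [PySem.Set.contains_iff, hmem, star_cond_iff rows i hi.1]
      exact hstar
    rw [hA, hB]
    rfl
  · have hA : get_cols_without_stars_colClear rows i
        (PySem.List.pyRange 0 (rows.length : Int) 1) = true := by
      rw [colClear_eq_true_iff]
      intro j hj hh
      exact hstar ⟨j, hj, hh⟩
    have hB : PySem.Set.contains (rows.foldl (fun s row =>
        (PySem.List.enumerate row.toList 0).foldl
          (fun s p => if p.2 = '#' then PySem.Set.add s p.1 else s) s) PySem.Set.empty) i = false := by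
      rw [Bool.eq_false_iff, ne_eq, PySem.Set.contains_iff, hmem, star_cond_iff rows i hi.1]
      exact hstar
    rw [hA, hB]
    rfl
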